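-- pv_equiv track=rewrite | github.com/Karna-Balaji-07/DSA_Sheet | Sorting Algorithms/Easy Problems/Leetcode 1636 - Sort Array by Increasing Frequency.py | solution
-- ===== SOURCE A (Python) =====
-- def solution(arr):
--     dicts = {}
--     for i in arr:
--         dicts[i] = dicts.get(i,0)+1
--
--     result = []
--     sorted_items = sorted(dicts.items(), key=lambda x: (x[1], -x[0]))
--     for key, value in sorted_items:
--         result.extend([key]*value)
--
--     return result
-- ===== SOURCE B (Python) =====
-- def solution(arr):
--     cnt = {}
--     for x in arr:
--         cnt[x] = cnt.get(x, 0) + 1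
--     return sorted(arr, key=lambda x: (cnt[x], -x))
-- ===== Notes on version B (the rewrite author's own statement) =====
-- stated objective: idiomatic
-- what changed: B sorts the whole input array directly by the key (frequency, -value) instead of sorting the distinct (value, count) pairs and rebuilding the output with an extend loop.
import Mathlib
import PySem

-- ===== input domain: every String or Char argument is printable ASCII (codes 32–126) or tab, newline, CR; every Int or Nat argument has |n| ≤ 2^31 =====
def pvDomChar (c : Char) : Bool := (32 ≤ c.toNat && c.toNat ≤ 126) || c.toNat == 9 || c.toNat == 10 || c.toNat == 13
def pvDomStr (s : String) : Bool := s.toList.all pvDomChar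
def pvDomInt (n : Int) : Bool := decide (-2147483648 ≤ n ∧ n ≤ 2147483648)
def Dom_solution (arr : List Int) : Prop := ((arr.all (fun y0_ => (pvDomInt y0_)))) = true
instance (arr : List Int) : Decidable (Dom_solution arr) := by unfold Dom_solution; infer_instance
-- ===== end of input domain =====

-- B sorts the whole input array directly by the key (frequency, -value) instead of sorting
-- the distinct (value, count) pairs and rebuilding the output with an extend loop (idiomatic).

-- ===== PORT A =====
def solution (arr : List Int) : List Int :=
  let dicts := arr.foldl (fun d i => d.insert i (d.getD i 0 + 1)) PySem.Dict.empty
  let sorted_items := PySem.List.sorted2 dicts.items (fun x => x.2) (fun x => -x.1)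
  sorted_items.foldl (fun result kv => result ++ PySem.List.pyRepeat [kv.1] kv.2) []

-- ===== PORT B =====
-- cnt[x] inside the sort key is ported as getD x 0: every x passed to the key is an element
-- of arr, hence a present key, so the default is never used.
def solution_alt (arr : List Int) : List Int :=
  let cnt : PySem.Dict Int Int := arr.foldl (fun d x => d.insert x (d.getD x 0 + 1)) PySem.Dict.empty
  PySem.List.sorted2 arr (fun x => cnt.getD x 0) (fun x => -x)

-- ===== PRECONDITION & SPEC =====
def Spec_solution (arr : List Int) (out : List Int) : Prop := out = solution_alt arr
instance (arr : List Int) (out : List Int) : Decidable (Spec_solution arr out) := by unfold Spec_solution; infer_instance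

-- ===== CLAIM (what is proved, stated in full; the proofs are below) =====
def Claim_equal_solution : Prop := ∀ (arr : List Int), Dom_solution arr → Spec_solution arr (solution arr)

-- ===== LEMMAS AND PROOFS =====

-- sorted2 with keys k1, k2 is sorted with the lexicographic key x ↦ toLex (k1 x, k2 x)
theorem sorted2_eq_sorted_toLex {α κ₁ κ₂ : Type} [LinearOrder κ₁] [LinearOrder κ₂]
    (xs : List α) (k1 : α → κ₁) (k2 : α → κ₂) :
    PySem.List.sorted2 xs k1 k2 = PySem.List.sorted xs (fun x => toLex (k1 x, k2 x)) := by
  rw [PySem.List.sorted_eq_foldl_insertBy]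
  show List.foldl (fun acc x => PySem.List.insertBy
      (fun a b => decide (k1 a < k1 b) || (!decide (k1 b < k1 a) && decide (k2 a < k2 b))) x acc)
      [] xs = _
  have hbef : ∀ a b : α,
      (decide (k1 a < k1 b) || (!decide (k1 b < k1 a) && decide (k2 a < k2 b)))
        = decide (toLex (k1 a, k2 a) < toLex (k1 b, k2 b)) := by
    intro a b
    rcases lt_trichotomy (k1 a) (k1 b) with h | h | h
    · simp [Prod.Lex.lt_iff, h]
    · simp [Prod.Lex.lt_iff, h]
    · simp [Prod.Lex.lt_iff, not_lt_of_gt h, h.ne']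
      intro hle
      exact absurd hle (not_le_of_gt h)
  simp only [hbef]

-- the common sort key
def lexKey (arr : List Int) (x : Int) : Lex (Int × Int) := toLex ((arr.count x : Int), -x)

theorem lexKey_injective (arr : List Int) : Function.Injective (lexKey arr) := by
  intro a b h
  unfold lexKey at h
  have h2 := congrArg (fun p => (ofLex p).2) h
  simpa using h2

theorem count_flatMap_replicate (arr : List Int) (S : List Int) (hnd : S.Nodup) (a : Int) :
    (S.flatMap (fun k => List.replicate (arr.count k) k)).count a
      = if a ∈ S then arr.count a else 0 := by
  induction S with
  | nil => simp
  | cons k S ih =>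
    rcases List.nodup_cons.mp hnd with ⟨hk, hS⟩
    by_cases hak : a = k
    · subst hak
      have : a ∉ S := hk
      simp [List.count_append, ih hS, this]
    · simp [List.count_append, List.count_replicate, ih hS, hak, Ne.symm hak, List.mem_cons]

theorem flatMap_replicate_perm (arr : List Int) (S : List Int) (hnd : S.Nodup)
    (hmem : ∀ x, x ∈ S ↔ x ∈ arr) :
    (S.flatMap (fun k => List.replicate (arr.count k) k)).Perm arr := by
  rw [List.perm_iff_count]
  intro a
  rw [count_flatMap_replicate arr S hnd a]
  by_cases ha : a ∈ S
  · simp [ha]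
  · have : a ∉ arr := fun h => ha ((hmem a).mpr h)
    simp [ha, List.count_eq_zero.mpr this]

-- membership in the counter's items pins down the pair
theorem mem_items_counter (arr : List Int) (p : Int × Int)
    (hp : p ∈ (PySem.Dict.counter arr).items) :
    p.2 = (arr.count p.1 : Int) ∧ p.1 ∈ arr := by
  rw [PySem.Dict.items_counter] at hp
  rcases List.mem_map.mp hp with ⟨k, hk, rfl⟩
  exact ⟨rfl, (PySem.Set.mem_ofList arr k).mp hk⟩

theorem solution_eq (arr : List Int) : solution arr = solution_alt arr := by
  unfold solution solution_alt
  show List.foldl (fun result kv => result ++ PySem.List.pyRepeat [kv.1] kv.2) []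
      (PySem.List.sorted2 (List.foldl (fun d i => d.insert i (d.getD i 0 + 1))
          (PySem.Dict.empty : PySem.Dict Int Int) arr).items
        (fun x => x.2) (fun x => -x.1))
      = PySem.List.sorted2 arr
        (fun x => (List.foldl (fun d x => d.insert x (d.getD x 0 + 1))
          (PySem.Dict.empty : PySem.Dict Int Int) arr).getD x 0)
        (fun x => -x)
  rw [PySem.Dict.foldl_insert_getD_add_one_eq_counter]
  rw [sorted2_eq_sorted_toLex, sorted2_eq_sorted_toLex, PySem.List.foldl_append_eq_flatMap]
  simp only [PySem.List.pyRepeat_singleton, List.nil_append]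
  have hkey : (fun x => toLex ((PySem.Dict.counter arr).getD x 0, -x)) = lexKey arr := by
    funext x; rw [PySem.Dict.getD_counter]; rfl
  rw [hkey]
  set L := PySem.List.sorted (PySem.Dict.counter arr).items (fun p => toLex (p.2, -p.1)) with hL
  -- every p ∈ L is (k, count k)
  have hmemL : ∀ p ∈ L, p.2 = (arr.count p.1 : Int) ∧ p.1 ∈ arr := by
    intro p hp
    exact mem_items_counter arr p ((PySem.List.mem_sorted _ _ _ _).mp hp)
  -- the flatMap over L, rewritten with Nat counts
  have hflat : L.flatMap (fun kv => List.replicate kv.2.toNat kv.1)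
      = L.flatMap (fun kv => List.replicate (arr.count kv.1) kv.1) := by
    apply List.flatMap_congr
    intro p hp
    rw [(hmemL p hp).1]
    simp
  rw [hflat]
  apply PySem.List.eq_of_perm_of_pairwise_le_of_injective (lexKey arr) (lexKey_injective arr)
  · -- permutation: both sides are permutations of arr
    have hperm1 : (L.flatMap (fun kv => List.replicate (arr.count kv.1) kv.1)).Perm
        ((PySem.Dict.counter arr).items.flatMap (fun kv => List.replicate (arr.count kv.1) kv.1)) :=
      List.Perm.flatMap (PySem.List.sorted_perm _ _ _) (fun _ _ => List.Perm.refl _)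
    have hitems : ((PySem.Dict.counter arr).items.flatMap
        (fun kv => List.replicate (arr.count kv.1) kv.1))
        = (PySem.Set.ofList arr).flatMap (fun k => List.replicate (arr.count k) k) := by
      rw [PySem.Dict.items_counter, List.flatMap_map]
    rw [hitems] at hperm1
    have hperm2 := flatMap_replicate_perm arr (PySem.Set.ofList arr)
      (PySem.Set.nodup_ofList arr) (PySem.Set.mem_ofList arr)
    exact (hperm1.trans hperm2).trans (PySem.List.sorted_perm arr (lexKey arr) _).symm
  · -- LHS pairwise
    rw [List.pairwise_flatMap]
    constructor
    · intro p _; exact List.pairwise_replicate.mpr (Or.inr le_rfl)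
    · have hpw := PySem.List.sorted_pairwise (PySem.Dict.counter arr).items
        (fun p => toLex (p.2, -p.1))
      rw [← hL] at hpw
      refine hpw.imp_of_mem ?_
      intro p q hp hq hle x hx y hy
      rcases List.eq_of_mem_replicate hx with rfl
      rcases List.eq_of_mem_replicate hy with rfl
      have h1 := (hmemL p hp).1
      have h2 := (hmemL q hq).1
      unfold lexKey
      rw [← h1, ← h2]
      exact hle
  · exact PySem.List.sorted_pairwise arr (lexKey arr)

-- ===== VERDICT (by name: the statement is the Claim_ definition above) =====
theorem solution_spec : Claim_equal_solution := by
  intro arr _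
  unfold Spec_solution
  exact solution_eq arr
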